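-- pv_equiv track=rewrite | github.com/jborchma/project_euler | Solutions/1-100/p86.py | find_possible_side_lengths
-- ===== SOURCE A (Python) =====
-- def find_possible_side_lengths(a, b, c, limit):
--     """Based on a Pythagorean triple, find all side lengths
--     """
--     counter = 0
--     z = b
--     for x in range(1, a):
--         y = a - x
--         if y < x:
--             break  # no double counting
--         if c ** 2 == min(
--             ((x + y) ** 2 + z ** 2, (z + y) ** 2 + x ** 2, (x + z) ** 2 + y ** 2)
--         ):
--             if max(x, y, z) <= limit:
--                 counter += 1
--
--     return counter
-- ===== SOURCE B (Python) =====
-- def _isqrt(n):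
--     # floor square root by bisection, n >= 0
--     if n < 2:
--         return n
--     lo, hi = 0, n + 1
--     while hi - lo > 1:
--         mid = (lo + hi) // 2
--         if mid * mid <= n:
--             lo = mid
--         else:
--             hi = mid
--     return lo
--
--
-- def find_possible_side_lengths(a, b, c, limit):
--     """Closed-form count: with y = a-x, z = b the three path candidates are
--     a^2+b^2, a^2+b^2+2y(b-x), a^2+b^2+2x(b-y); solve for x directly."""
--     m = a // 2  # largest x with y = a-x >= x
--     if m < 1:
--         return 0
--     k = c * c - a * a - b * b
--     if k > 0:
--         return 0  # c^2 exceeds every candidate's minimum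
--     if k == 0:
--         # condition holds iff b >= x and b >= y; count the interval
--         if b > limit:
--             return 0
--         lo = max(1, a - b, a - limit)
--         hi = min(m, b, limit)
--         return hi - lo + 1 if hi >= lo else 0
--     # k < 0: x must solve one of two quadratics with common discriminant d
--     d = 2 * c * c - (a + b) * (a + b)
--     if d < 0:
--         return 0
--     s = _isqrt(d)
--     if s * s != d:
--         return 0
--     cands = set()
--     for t in (a + b + s, a + b - s, a - b + s, a - b - s):
--         if t % 2 == 0:
--             cands.add(t // 2)
--     n = 0
--     for x in cands:
--         y = a - x
--         if 1 <= x <= m and max(x, y, b) <= limit and c * c == min(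
--             (x + y) ** 2 + b ** 2, (b + y) ** 2 + x ** 2, (x + b) ** 2 + y ** 2
--         ):
--             n += 1
--     return n
-- ===== Notes on version B (the rewrite author's own statement) =====
-- stated objective: faster
-- what changed: A scans all x in range(1, a) testing each split; B solves the condition in closed form: the three path candidates are a^2+b^2, a^2+b^2+2y(b-x) and a^2+b^2+2x(b-y), so for c^2 = a^2+b^2 the valid x form an interval counted arithmetically, and otherwise x must be an integer root of one of two quadratics with common discriminant 2c^2-(a+b)^2, leaving at most four candidates to check.
import Mathlib
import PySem

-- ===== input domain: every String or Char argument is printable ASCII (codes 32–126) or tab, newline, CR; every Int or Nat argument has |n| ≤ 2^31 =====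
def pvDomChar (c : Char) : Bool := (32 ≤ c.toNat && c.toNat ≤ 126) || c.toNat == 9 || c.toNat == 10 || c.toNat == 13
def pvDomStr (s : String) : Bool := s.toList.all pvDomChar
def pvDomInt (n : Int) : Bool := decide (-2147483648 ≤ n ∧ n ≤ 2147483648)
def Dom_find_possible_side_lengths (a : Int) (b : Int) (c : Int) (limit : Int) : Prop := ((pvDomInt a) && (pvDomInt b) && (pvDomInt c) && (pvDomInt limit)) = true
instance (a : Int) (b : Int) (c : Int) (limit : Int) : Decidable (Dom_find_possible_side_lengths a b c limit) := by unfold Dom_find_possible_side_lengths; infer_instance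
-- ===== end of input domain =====

-- ===== PORT A =====
-- A's loop: for x in range(1, a) with early break when y < x.
def pvLoopA (a b c limit : Int) : List Int → Int → Int
  | [], counter => counter
  | x :: rest, counter =>
    let y := a - x
    if y < x then counter
    else
      pvLoopA a b c limit rest
        (if c ^ 2 = min (min ((x + y) ^ 2 + b ^ 2) ((b + y) ^ 2 + x ^ 2)) ((x + b) ^ 2 + y ^ 2) then
          (if max (max x y) b ≤ limit then counter + 1 else counter)
        else counter)

def find_possible_side_lengths (a : Int) (b : Int) (c : Int) (limit : Int) : Int :=
  pvLoopA a b c limit (PySem.List.pyRange 1 a) 0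

-- ===== PORT B =====
-- One honest line: B replaces A's O(a) scan by an O(1) case analysis — the three
-- path candidates are a^2+b^2, a^2+b^2+2y(b-x), a^2+b^2+2x(b-y); for c^2 = a^2+b^2
-- the solutions form an interval, otherwise x must be a root of one of two quadratics.

-- floor square root by bisection (Source B's while loop; fuel 70 covers every |n| ≤ 2^63)
def pvIsqrtGo (n : Int) : Nat → Int → Int → Int
  | 0, lo, _ => lo
  | fuel + 1, lo, hi =>
    if hi - lo > 1 then
      let mid := PySem.Int.floordiv (lo + hi) 2
      if mid * mid ≤ n then pvIsqrtGo n fuel mid hi else pvIsqrtGo n fuel lo mid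
    else lo

def pvIsqrt (n : Int) : Int := if n < 2 then n else pvIsqrtGo n 70 0 (n + 1)

-- one step of Source B's candidate loop: if t % 2 == 0: cands.add(t // 2)
def pvAddCand (s : PySem.Set Int) (t : Int) : PySem.Set Int :=
  if PySem.Int.mod t 2 = 0 then PySem.Set.add s (PySem.Int.floordiv t 2) else s

-- Source B's per-candidate check
def pvCheckB (a b c limit m x : Int) : Bool :=
  let y := a - x
  decide (1 ≤ x) && decide (x ≤ m) && decide (max (max x y) b ≤ limit) &&
    decide (c * c = min (min ((x + y) ^ 2 + b ^ 2) ((b + y) ^ 2 + x ^ 2)) ((x + b) ^ 2 + y ^ 2))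

def find_possible_side_lengths_alt (a : Int) (b : Int) (c : Int) (limit : Int) : Int :=
  let m := PySem.Int.floordiv a 2
  if m < 1 then 0
  else
    let k := c * c - a * a - b * b
    if k > 0 then 0
    else if k = 0 then
      if b > limit then 0
      else
        let lo := max (max 1 (a - b)) (a - limit)
        let hi := min (min m b) limit
        if lo ≤ hi then hi - lo + 1 else 0
    else
      let d := 2 * c * c - (a + b) * (a + b)
      if d < 0 then 0
      else
        let s := pvIsqrt d
        if s * s ≠ d then 0
        else
          let cands := ([a + b + s, a + b - s, a - b + s, a - b - s]).foldl pvAddCand PySem.Set.empty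
          cands.foldl (fun n x => if pvCheckB a b c limit m x then n + 1 else n) 0

-- ===== PRECONDITION & SPEC =====
def Spec_find_possible_side_lengths (a : Int) (b : Int) (c : Int) (limit : Int) (out : Int) : Prop := out = find_possible_side_lengths_alt a b c limit
instance (a : Int) (b : Int) (c : Int) (limit : Int) (out : Int) : Decidable (Spec_find_possible_side_lengths a b c limit out) := by unfold Spec_find_possible_side_lengths; infer_instance

-- ===== CLAIM (what is proved, stated in full; the proofs are below) =====
def Claim_equal_find_possible_side_lengths : Prop := ∀ (a : Int) (b : Int) (c : Int) (limit : Int), Dom_find_possible_side_lengths a b c limit → Spec_find_possible_side_lengths a b c limit (find_possible_side_lengths a b c limit)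

-- ===== LEMMAS AND PROOFS =====

-- the predicate A's loop effectively counts
def pvCondA (a b c limit x : Int) : Bool :=
  decide (¬ (a - x < x)) &&
    (decide (c ^ 2 = min (min ((x + (a - x)) ^ 2 + b ^ 2) ((b + (a - x)) ^ 2 + x ^ 2)) ((x + b) ^ 2 + (a - x) ^ 2)) &&
      decide (max (max x (a - x)) b ≤ limit))

theorem pvLoopA_count (a b c limit : Int) :
    ∀ (n : Nat) (s cnt : Int), (a - s).toNat = n →
      pvLoopA a b c limit (PySem.List.pyRange s a) cnt
        = cnt + ((PySem.List.pyRange s a).countP (pvCondA a b c limit) : Int) := by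
  intro n
  induction n with
  | zero =>
    intro s cnt hn
    rw [PySem.List.pyRange_one_eq_nil (by omega)]
    simp [pvLoopA]
  | succ n ih =>
    intro s cnt hn
    have hs : s < a := by omega
    rw [PySem.List.pyRange_one_cons hs]
    by_cases hbr : a - s < s
    · have hcond : pvCondA a b c limit s = false := by
        simp [pvCondA]; omega
      have hrest : (PySem.List.pyRange (s + 1) a).countP (pvCondA a b c limit) = 0 := by
        rw [List.countP_eq_zero]
        intro x hx
        have hx' := (PySem.List.mem_pyRange_one (a := s + 1) (b := a) (x := x)).1 hx
        simp [pvCondA]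
        omega
      simp only [pvLoopA, if_pos hbr, List.countP_cons, hrest, hcond]
      simp
    · have step : pvLoopA a b c limit (s :: PySem.List.pyRange (s + 1) a) cnt
          = pvLoopA a b c limit (PySem.List.pyRange (s + 1) a)
              (cnt + if pvCondA a b c limit s then 1 else 0) := by
        simp only [pvLoopA, if_neg hbr]
        congr 1
        by_cases h1 : c ^ 2 = min (min ((s + (a - s)) ^ 2 + b ^ 2) ((b + (a - s)) ^ 2 + s ^ 2)) ((s + b) ^ 2 + (a - s) ^ 2)
        · by_cases h2 : max (max s (a - s)) b ≤ limit
          · simp only [pvCondA, if_pos h1, if_pos h2, decide_eq_true hbr, decide_eq_true h1,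
              decide_eq_true h2, Bool.and_self, if_pos]
          · simp only [pvCondA, if_pos h1, if_neg h2, decide_eq_true hbr, decide_eq_true h1,
              decide_eq_false h2, Bool.and_false, if_neg, Bool.false_eq_true,
              not_false_eq_true, add_zero]
        · simp only [pvCondA, if_neg h1, decide_eq_true hbr, decide_eq_false h1,
            Bool.false_and, Bool.true_and, Bool.false_eq_true, not_false_eq_true, if_neg, add_zero]
      rw [step, ih (s + 1) _ (by omega), List.countP_cons]
      split_ifs <;> push_cast <;> ring

theorem pvFoldl_count (p : Int → Bool) :
    ∀ (l : List Int) (n : Int),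
      l.foldl (fun n x => if p x then n + 1 else n) n = n + (l.countP p : Int) := by
  intro l
  induction l with
  | nil => simp
  | cons x xs ih =>
    intro n
    simp only [List.foldl_cons, List.countP_cons, ih]
    split_ifs <;> push_cast <;> ring

theorem pvIsqrtGo_spec (n : Int) :
    ∀ (fuel : Nat) (lo hi : Int), 0 ≤ lo → lo * lo ≤ n → n < hi * hi → lo < hi →
      hi - lo ≤ 2 ^ fuel →
      0 ≤ pvIsqrtGo n fuel lo hi ∧ pvIsqrtGo n fuel lo hi * pvIsqrtGo n fuel lo hi ≤ n ∧
        n < (pvIsqrtGo n fuel lo hi + 1) * (pvIsqrtGo n fuel lo hi + 1) := by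
  intro fuel
  induction fuel with
  | zero =>
    intro lo hi h0 h1 h2 h3 h4
    have : hi = lo + 1 := by omega
    subst this
    simp only [pvIsqrtGo]
    exact ⟨h0, h1, h2⟩
  | succ f ih =>
    intro lo hi h0 h1 h2 h3 h4
    simp only [pvIsqrtGo]
    by_cases hgt : hi - lo > 1
    · rw [if_pos hgt]
      have hmid : PySem.Int.floordiv (lo + hi) 2 = (lo + hi) / 2 := by
        simp [PySem.Int.floordiv, Int.fdiv_eq_ediv]
      have hpow : (2 : Int) ^ (f + 1) = 2 * 2 ^ f := by ring
      rw [hpow] at h4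
      rw [hmid]
      by_cases hle : ((lo + hi) / 2) * ((lo + hi) / 2) ≤ n
      · rw [if_pos hle]
        exact ih _ _ (by omega) hle h2 (by omega) (by omega)
      · rw [if_neg hle]
        exact ih _ _ h0 h1 (by omega) (by omega) (by omega)
    · rw [if_neg hgt]
      have : hi = lo + 1 := by omega
      subst this
      exact ⟨h0, h1, h2⟩

theorem pvIsqrt_eq (n t : Int) (ht : 0 ≤ t) (hb : n ≤ 2 ^ 70 - 1) (h : t * t = n) :
    pvIsqrt n = t := by
  have hn : 0 ≤ n := h ▸ mul_self_nonneg t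
  unfold pvIsqrt
  by_cases h2 : n < 2
  · rw [if_pos h2]
    have h3 : t ≤ 1 := by nlinarith
    interval_cases t <;> omega
  · rw [if_neg h2]
    obtain ⟨hr0, hr1, hr2⟩ := pvIsqrtGo_spec n 70 0 (n + 1) le_rfl (by nlinarith)
      (by nlinarith) (by omega) (by norm_num at hb ⊢; omega)
    set r := pvIsqrtGo n 70 0 (n + 1) with hr
    have hle : r ≤ t := by nlinarith
    have hge : t ≤ r := by nlinarith
    omega

theorem pvMem_pvAddCand_of_mem (s : PySem.Set Int) (t x : Int) (h : x ∈ s) : x ∈ pvAddCand s t := by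
  unfold pvAddCand
  split_ifs
  · exact (PySem.Set.mem_add _ _ _).2 (Or.inl h)
  · exact h

theorem pvMem_pvAddCand_self (s : PySem.Set Int) (x : Int) : x ∈ pvAddCand s (2 * x) := by
  unfold pvAddCand
  have hm : PySem.Int.mod (2 * x) 2 = 0 := by
    simp [PySem.Int.mod, Int.fmod_eq_emod]
  have hd : PySem.Int.floordiv (2 * x) 2 = x := Int.mul_fdiv_cancel_left x (by norm_num)
  rw [if_pos hm, hd]
  exact (PySem.Set.mem_add _ _ _).2 (Or.inr rfl)

theorem pvNodup_pvAddCand (s : PySem.Set Int) (t : Int) (h : s.Nodup) : (pvAddCand s t).Nodup := by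
  unfold pvAddCand
  split_ifs
  · exact PySem.Set.nodup_add _ _ h
  · exact h

theorem pvCountP_interval (lo hi s e : Int) (h1 : s ≤ lo) (h2 : hi < e) (hle : lo ≤ hi) :
    ((PySem.List.pyRange s e).countP (fun x => decide (lo ≤ x ∧ x ≤ hi)) : Int) = hi - lo + 1 := by
  rw [PySem.List.pyRange_one_append s lo e h1 (by omega),
    PySem.List.pyRange_one_append lo (hi + 1) e (by omega) (by omega)]
  rw [List.countP_append, List.countP_append]
  have hz1 : (PySem.List.pyRange s lo).countP (fun x => decide (lo ≤ x ∧ x ≤ hi)) = 0 := by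
    rw [List.countP_eq_zero]
    intro x hx
    have := (PySem.List.mem_pyRange_one).1 hx
    simp; omega
  have hz2 : (PySem.List.pyRange (hi + 1) e).countP (fun x => decide (lo ≤ x ∧ x ≤ hi)) = 0 := by
    rw [List.countP_eq_zero]
    intro x hx
    have := (PySem.List.mem_pyRange_one).1 hx
    simp; omega
  have hfull : (PySem.List.pyRange lo (hi + 1)).countP (fun x => decide (lo ≤ x ∧ x ≤ hi))
      = (PySem.List.pyRange lo (hi + 1)).length := by
    rw [List.countP_eq_length]
    intro x hx
    have := (PySem.List.mem_pyRange_one).1 hx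
    simp; omega
  rw [hz1, hz2, hfull, PySem.List.length_pyRange_one]
  push_cast
  omega


theorem pvCondA_iff (a b c limit x : Int) :
    pvCondA a b c limit x = true ↔
      (2 * x ≤ a ∧
        c ^ 2 = min (min ((x + (a - x)) ^ 2 + b ^ 2) ((b + (a - x)) ^ 2 + x ^ 2)) ((x + b) ^ 2 + (a - x) ^ 2) ∧
        max (max x (a - x)) b ≤ limit) := by
  simp only [pvCondA, Bool.and_eq_true, decide_eq_true_eq]
  constructor
  · rintro ⟨h1, h2, h3⟩; exact ⟨by omega, h2, h3⟩
  · rintro ⟨h1, h2, h3⟩; exact ⟨by omega, h2, h3⟩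

theorem pvCheckB_iff (a b c limit m x : Int) :
    pvCheckB a b c limit m x = true ↔
      (1 ≤ x ∧ x ≤ m ∧ max (max x (a - x)) b ≤ limit ∧
        c * c = min (min ((x + (a - x)) ^ 2 + b ^ 2) ((b + (a - x)) ^ 2 + x ^ 2)) ((x + b) ^ 2 + (a - x) ^ 2)) := by
  simp [pvCheckB, and_assoc]

theorem pvK0_iff (a b c limit x : Int) (hx1 : 1 ≤ x) (hk : c * c - a * a - b * b = 0)
    (hbl : b ≤ limit) :
    pvCondA a b c limit x = true ↔
      (max (max 1 (a - b)) (a - limit) ≤ x ∧ x ≤ min (min (a / 2) b) limit) := by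
  rw [pvCondA_iff]
  constructor
  · rintro ⟨h1, h2, h3⟩
    have hxy : x ≤ a - x := by omega
    have hT2 : c ^ 2 ≤ (b + (a - x)) ^ 2 + x ^ 2 :=
      h2 ▸ le_trans (min_le_left _ _) (min_le_right _ _)
    have hT3 : c ^ 2 ≤ (x + b) ^ 2 + (a - x) ^ 2 := h2 ▸ min_le_right _ _
    have hcc : c ^ 2 = c * c := by ring
    rw [hcc] at hT2 hT3
    have hxb : x ≤ b := by nlinarith
    have hyb : a - x ≤ b := by nlinarith
    have hxl : x ≤ limit := le_trans (le_trans (le_max_left _ _) (le_max_left _ _)) h3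
    have hyl : a - x ≤ limit := le_trans (le_trans (le_max_right _ _) (le_max_left _ _)) h3
    have hbl : b ≤ limit := le_trans (le_max_right _ _) h3
    simp only [max_le_iff, le_min_iff]
    omega
  · simp only [max_le_iff, le_min_iff]
    rintro ⟨⟨⟨hx1', hxab⟩, hxal⟩, ⟨hxm, hxb⟩, hxl⟩
    have hxy : x ≤ a - x := by omega
    refine ⟨by omega, ?_, ?_⟩
    · have e1 : (x + (a - x)) ^ 2 + b ^ 2 = c ^ 2 := by nlinarith
      have e2 : (x + (a - x)) ^ 2 + b ^ 2 ≤ (b + (a - x)) ^ 2 + x ^ 2 := by nlinarith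
      have e3 : (x + (a - x)) ^ 2 + b ^ 2 ≤ (x + b) ^ 2 + (a - x) ^ 2 := by nlinarith
      rw [min_eq_left e2, min_eq_left e3, e1]
    · exact ⟨⟨hxl, by omega⟩, hbl⟩

theorem pvRoot (a b c x : Int) (hk : c * c - a * a - b * b ≠ 0)
    (h2 : c ^ 2 = min (min ((x + (a - x)) ^ 2 + b ^ 2) ((b + (a - x)) ^ 2 + x ^ 2)) ((x + b) ^ 2 + (a - x) ^ 2)) :
    (2 * x - (a + b)) ^ 2 = 2 * c * c - (a + b) * (a + b) ∨
      (2 * x - (a - b)) ^ 2 = 2 * c * c - (a + b) * (a + b) := by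
  rcases min_choice (min ((x + (a - x)) ^ 2 + b ^ 2) ((b + (a - x)) ^ 2 + x ^ 2)) ((x + b) ^ 2 + (a - x) ^ 2) with hmin | hmin
  · rw [hmin] at h2
    rcases min_choice ((x + (a - x)) ^ 2 + b ^ 2) ((b + (a - x)) ^ 2 + x ^ 2) with hmin' | hmin'
    · rw [hmin'] at h2
      exact absurd (by nlinarith) hk
    · rw [hmin'] at h2
      left; linear_combination (-2 : Int) * h2
  · rw [hmin] at h2
    right; linear_combination (-2 : Int) * h2

theorem pvMem_cands (x t1 t2 t3 t4 : Int)
    (h : 2 * x = t1 ∨ 2 * x = t2 ∨ 2 * x = t3 ∨ 2 * x = t4) :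
    x ∈ ([t1, t2, t3, t4].foldl pvAddCand PySem.Set.empty) := by
  simp only [List.foldl_cons, List.foldl_nil]
  rcases h with h | h | h | h
  · subst h
    apply pvMem_pvAddCand_of_mem; apply pvMem_pvAddCand_of_mem
    apply pvMem_pvAddCand_of_mem; exact pvMem_pvAddCand_self _ x
  · subst h
    apply pvMem_pvAddCand_of_mem; apply pvMem_pvAddCand_of_mem
    exact pvMem_pvAddCand_self _ x
  · subst h
    apply pvMem_pvAddCand_of_mem; exact pvMem_pvAddCand_self _ x
  · subst h
    exact pvMem_pvAddCand_self _ x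

theorem pvNodup_cands (t1 t2 t3 t4 : Int) :
    ([t1, t2, t3, t4].foldl pvAddCand PySem.Set.empty).Nodup := by
  simp only [List.foldl_cons, List.foldl_nil]
  exact pvNodup_pvAddCand _ _ (pvNodup_pvAddCand _ _ (pvNodup_pvAddCand _ _
    (pvNodup_pvAddCand _ _ List.nodup_nil)))

-- ===== VERDICT (by name: the statement is the Claim_ definition above) =====
theorem find_possible_side_lengths_spec : Claim_equal_find_possible_side_lengths := by
  intro a b c limit hdom
  unfold Spec_find_possible_side_lengths
  have hA : find_possible_side_lengths a b c limit
      = ((PySem.List.pyRange 1 a).countP (pvCondA a b c limit) : Int) := by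
    unfold find_possible_side_lengths
    rw [pvLoopA_count a b c limit (a - 1).toNat 1 0 rfl]
    ring
  rw [hA]
  have hfd : PySem.Int.floordiv a 2 = a / 2 := by
    simp [PySem.Int.floordiv, Int.fdiv_eq_ediv]
  by_cases hm : a / 2 < 1
  · have hnil : PySem.List.pyRange 1 a = [] := PySem.List.pyRange_one_eq_nil (by omega)
    simp only [find_possible_side_lengths_alt]
    rw [if_pos (by rw [hfd]; omega : PySem.Int.floordiv a 2 < 1), hnil]
    simp
  · have ha2 : 2 ≤ a := by omega
    have hm' : ¬ (PySem.Int.floordiv a 2 < 1) := by rw [hfd]; omega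
    by_cases hkpos : c * c - a * a - b * b > 0
    · have hz : (PySem.List.pyRange 1 a).countP (pvCondA a b c limit) = 0 := by
        rw [List.countP_eq_zero]
        intro x hx hcond
        obtain ⟨h1, h2, h3⟩ := (pvCondA_iff a b c limit x).1 hcond
        have hle : c ^ 2 ≤ (x + (a - x)) ^ 2 + b ^ 2 :=
          h2 ▸ le_trans (min_le_left _ _) (min_le_left _ _)
        nlinarith
      rw [hz]
      simp only [find_possible_side_lengths_alt]
      rw [if_neg hm', if_pos hkpos]
      simp
    · by_cases hk0 : c * c - a * a - b * b = 0
      · by_cases hbl : b > limit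
        · have hz : (PySem.List.pyRange 1 a).countP (pvCondA a b c limit) = 0 := by
            rw [List.countP_eq_zero]
            intro x hx hcond
            obtain ⟨h1, h2, h3⟩ := (pvCondA_iff a b c limit x).1 hcond
            have := le_trans (le_max_right (max x (a - x)) b) h3
            omega
          rw [hz]
          simp only [find_possible_side_lengths_alt]
          rw [if_neg hm', if_neg hkpos, if_pos hk0, if_pos hbl]
          simp
        · have hcongr : (PySem.List.pyRange 1 a).countP (pvCondA a b c limit)
              = (PySem.List.pyRange 1 a).countP
                  (fun x => decide (max (max 1 (a - b)) (a - limit) ≤ x ∧ x ≤ min (min (a / 2) b) limit)) := by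
            apply List.countP_congr
            intro x hx
            have hx' := (PySem.List.mem_pyRange_one).1 hx
            rw [pvK0_iff a b c limit x (by omega) hk0 (by omega)]
            simp
          by_cases hlh : max (max 1 (a - b)) (a - limit) ≤ min (min (a / 2) b) limit
          · have hlo : (1 : Int) ≤ max (max 1 (a - b)) (a - limit) :=
              le_trans (le_max_left _ _) (le_max_left _ _)
            have hhi : min (min (a / 2) b) limit ≤ a / 2 :=
              le_trans (min_le_left _ _) (min_le_left _ _)
            rw [hcongr, pvCountP_interval _ _ 1 a hlo (by omega) hlh]
            simp only [find_possible_side_lengths_alt]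
            rw [if_neg hm', if_neg hkpos, if_pos hk0, if_neg hbl, hfd, if_pos hlh]
          · have hz : (PySem.List.pyRange 1 a).countP
                (fun x => decide (max (max 1 (a - b)) (a - limit) ≤ x ∧ x ≤ min (min (a / 2) b) limit)) = 0 := by
              rw [List.countP_eq_zero]
              intro x hx
              simp only [decide_eq_true_eq]
              omega
            rw [hcongr, hz]
            simp only [find_possible_side_lengths_alt]
            rw [if_neg hm', if_neg hkpos, if_pos hk0, if_neg hbl, hfd, if_neg hlh]
            simp
      · -- k < 0
        simp only [Dom_find_possible_side_lengths, Bool.and_eq_true, pvDomInt,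
          decide_eq_true_eq] at hdom
        obtain ⟨⟨⟨hda, hdb'⟩, hdc⟩, hdl⟩ := hdom
        have hdbound : 2 * c * c - (a + b) * (a + b) ≤ 2 ^ 70 - 1 := by
          have h1 : (2147483648 - c) * (2147483648 + c) ≥ 0 :=
            mul_nonneg (by omega) (by omega)
          have h2 : (a + b) * (a + b) ≥ 0 := mul_self_nonneg _
          norm_num
          nlinarith
        by_cases hdneg : 2 * c * c - (a + b) * (a + b) < 0
        · have hz : (PySem.List.pyRange 1 a).countP (pvCondA a b c limit) = 0 := by
            rw [List.countP_eq_zero]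
            intro x hx hcond
            obtain ⟨h1, h2, h3⟩ := (pvCondA_iff a b c limit x).1 hcond
            rcases pvRoot a b c x hk0 h2 with hr | hr
            · have := sq_nonneg (2 * x - (a + b)); omega
            · have := sq_nonneg (2 * x - (a - b)); omega
          rw [hz]
          simp only [find_possible_side_lengths_alt]
          rw [if_neg hm', if_neg hkpos, if_neg hk0, if_pos hdneg]
          simp
        · by_cases hsq : pvIsqrt (2 * c * c - (a + b) * (a + b)) * pvIsqrt (2 * c * c - (a + b) * (a + b))
              = 2 * c * c - (a + b) * (a + b)
          · -- main branch: d is a perfect square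
            have hcnt : (PySem.List.pyRange 1 a).countP (pvCondA a b c limit)
                = ([a + b + pvIsqrt (2 * c * c - (a + b) * (a + b)),
                    a + b - pvIsqrt (2 * c * c - (a + b) * (a + b)),
                    a - b + pvIsqrt (2 * c * c - (a + b) * (a + b)),
                    a - b - pvIsqrt (2 * c * c - (a + b) * (a + b))].foldl pvAddCand PySem.Set.empty).countP
                    (pvCheckB a b c limit (PySem.Int.floordiv a 2)) := by
              rw [List.countP_eq_length_filter, List.countP_eq_length_filter]
              apply List.Perm.length_eq
              rw [List.perm_ext_iff_of_nodup
                (List.Nodup.filter _ (PySem.List.nodup_pyRange_one 1 a))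
                (List.Nodup.filter _ (pvNodup_cands _ _ _ _))]
              intro x
              simp only [List.mem_filter]
              constructor
              · rintro ⟨hxr, hcond⟩
                have hx' := (PySem.List.mem_pyRange_one).1 hxr
                obtain ⟨h1, h2, h3⟩ := (pvCondA_iff a b c limit x).1 hcond
                refine ⟨?_, ?_⟩
                · rcases pvRoot a b c x hk0 h2 with hr | hr
                  · have hs' : pvIsqrt (2 * c * c - (a + b) * (a + b)) = |2 * x - (a + b)| :=
                      pvIsqrt_eq _ _ (abs_nonneg _) hdbound
                        (by rw [abs_mul_abs_self]; linear_combination hr)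
                    apply pvMem_cands
                    rcases abs_cases (2 * x - (a + b)) with ⟨he, _⟩ | ⟨he, _⟩ <;> rw [hs'] <;> omega
                  · have hs' : pvIsqrt (2 * c * c - (a + b) * (a + b)) = |2 * x - (a - b)| :=
                      pvIsqrt_eq _ _ (abs_nonneg _) hdbound
                        (by rw [abs_mul_abs_self]; linear_combination hr)
                    apply pvMem_cands
                    rcases abs_cases (2 * x - (a - b)) with ⟨he, _⟩ | ⟨he, _⟩ <;> rw [hs'] <;> omega
                · rw [pvCheckB_iff]
                  refine ⟨by omega, by rw [hfd]; omega, h3, ?_⟩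
                  rw [show c * c = c ^ 2 by ring]
                  exact h2
              · rintro ⟨hxc, hchk⟩
                obtain ⟨g1, g2, g3, g4⟩ := (pvCheckB_iff a b c limit _ x).1 hchk
                rw [hfd] at g2
                refine ⟨(PySem.List.mem_pyRange_one).2 ⟨g1, by omega⟩,
                  (pvCondA_iff a b c limit x).2 ⟨by omega, ?_, g3⟩⟩
                rw [show c ^ 2 = c * c by ring]
                exact g4
            simp only [find_possible_side_lengths_alt]
            rw [if_neg hm', if_neg hkpos, if_neg hk0, if_neg hdneg,
              if_neg (not_not_intro hsq), pvFoldl_count, hcnt]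
            ring
          · have hz : (PySem.List.pyRange 1 a).countP (pvCondA a b c limit) = 0 := by
              rw [List.countP_eq_zero]
              intro x hx hcond
              obtain ⟨h1, h2, h3⟩ := (pvCondA_iff a b c limit x).1 hcond
              rcases pvRoot a b c x hk0 h2 with hr | hr
              · have hs' : pvIsqrt (2 * c * c - (a + b) * (a + b)) = |2 * x - (a + b)| :=
                  pvIsqrt_eq _ _ (abs_nonneg _) hdbound
                    (by rw [abs_mul_abs_self]; linear_combination hr)
                apply hsq
                rw [hs', abs_mul_abs_self]
                linear_combination hr
              · have hs' : pvIsqrt (2 * c * c - (a + b) * (a + b)) = |2 * x - (a - b)| :=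
                  pvIsqrt_eq _ _ (abs_nonneg _) hdbound
                    (by rw [abs_mul_abs_self]; linear_combination hr)
                apply hsq
                rw [hs', abs_mul_abs_self]
                linear_combination hr
            rw [hz]
            simp only [find_possible_side_lengths_alt]
            rw [if_neg hm', if_neg hkpos, if_neg hk0, if_neg hdneg, if_pos hsq]
            simp
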